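-- pv_equiv track=rewrite | github.com/A-Hanson/IRSPriorYearFormApplication | src/scrape_data.py | condense_data_to_include_year_range_with_search_terms
-- ===== SOURCE A (Python) =====
-- def condense_data_to_include_year_range_with_search_terms(table, term):
--     '''
--     Parameters: list of dicts : table, boolean : has_search_terms, list of strings : terms
--     Iterates through set of scraped data
--     Creates list of dicts with year ranges
--     Filters to exact matches for form number
--     Returns: list of dicts
--     '''
--     temp_list = []
--     keys = [list(table[0])]
--     form_num = keys[0][0]
--     form_title = keys[0][1]
--     year = keys[0][2]
--     table_length = len(table)
--     first_row = table[0]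
--     first_dict = dict( [
--         (form_num, first_row[form_num]),
--         (form_title, first_row[form_title]),
--         ('min_year', first_row[year]),
--         ('max_year', first_row[year])
--         ] )
--     temp_list.append(first_dict)
--     for i in range(table_length):
--         if table[i][form_num] == term:
--             place_holder = temp_list.pop()
--             if ((table[i][form_num] == place_holder[form_num]) &
--                 (table[i][form_title] == place_holder[form_title])):
--                 place_holder['min_year'] = table[i][year]
--                 temp_list.append(place_holder)
--             else:
--                 temp_list.append(place_holder)
--                 temp_dict = dict( [
--                     (form_num, table[i][form_num]),
--                     (form_title, table[i][form_title]),
--                     ('min_year', table[i][year]),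
--                     ('max_year', table[i][year])
--                 ] )
--                 temp_list.append(temp_dict)
--     if temp_list[0][form_num] != term:
--         del temp_list[0]
--     return temp_list
-- ===== SOURCE B (Python) =====
-- from itertools import groupby
--
--
-- def condense_data_to_include_year_range_with_search_terms(table, term):
--     '''Group the rows matching the form number into consecutive-title runs,
--     emitting one dict per run with max_year from its first row and min_year
--     from its last row.'''
--     form_num, form_title, year = list(table[0])[:3]
--     matching = [row for row in table if row[form_num] == term]
--     result = []
--     for title, run in groupby(matching, key=lambda r: r[form_title]):
--         run = list(run)
--         result.append(dict([
--             (form_num, term),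
--             (form_title, title),
--             ('min_year', run[-1][year]),
--             ('max_year', run[0][year]),
--         ]))
--     return result
-- ===== Notes on version B (the rewrite author's own statement) =====
-- stated objective: simpler
-- what changed: Replaces A's seed-dict/stack machinery (seed row pushed up front, pop-and-repush per matching row, deletion of the seed at the end) by a plain filter of the matching rows followed by itertools.groupby on the title, emitting one dict per run with max_year from the run's first row and min_year from its last.
import Mathlib
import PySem

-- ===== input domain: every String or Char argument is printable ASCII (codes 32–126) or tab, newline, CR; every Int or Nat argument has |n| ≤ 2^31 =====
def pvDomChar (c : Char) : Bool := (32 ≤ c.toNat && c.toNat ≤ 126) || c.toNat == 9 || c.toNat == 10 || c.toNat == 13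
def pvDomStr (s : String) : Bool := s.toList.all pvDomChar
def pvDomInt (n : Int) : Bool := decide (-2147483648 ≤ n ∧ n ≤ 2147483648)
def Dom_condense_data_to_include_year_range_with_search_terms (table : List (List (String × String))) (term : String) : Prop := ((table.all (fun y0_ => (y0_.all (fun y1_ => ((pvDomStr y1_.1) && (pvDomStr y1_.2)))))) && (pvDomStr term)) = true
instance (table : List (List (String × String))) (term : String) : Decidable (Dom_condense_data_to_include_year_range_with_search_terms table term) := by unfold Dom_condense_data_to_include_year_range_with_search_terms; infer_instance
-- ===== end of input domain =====

-- B replaces A's seed-dict/stack machinery by filter-the-matching-rows + group-consecutive-equal-titles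
-- (objective: simpler). Equality proved on the return value; neither program mutates its arguments.
-- Rows (Python dicts) arrive as pair lists; pvRowGet is Python's row[key] on dict(row) (KeyError excluded by Pre_).
def pvRowGet (row : List (String × String)) (k : String) : String :=
  (PySem.Dict.ofList row).getD k ""

-- ===== PORT A =====
-- the first three keys of a row dict (none where Python raises unpacking them)
def pvUnpackKeys (keys : List String) : Option (String × String × String) :=
  match keys with
  | fn :: ft :: yr :: _ => some (fn, ft, yr)
  | _ => none

-- loop body of A's 'for i in range(table_length)'; temp_list is kept head-as-top (append/pop at the head),
-- reversed at the end, so .pop() / .append() are the head operations here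
def pvStepA (fn ft yr term : String) (acc : List (PySem.Dict String String))
    (row : List (String × String)) : List (PySem.Dict String String) :=
  if pvRowGet row fn == term then
    match acc with
    | [] => []  -- unreachable: the stack is never empty in A
    | ph :: rest =>
      if (pvRowGet row fn == ph.getD fn "") && (pvRowGet row ft == ph.getD ft "") then
        ph.insert "min_year" (pvRowGet row yr) :: rest
      else
        PySem.Dict.ofList [(fn, pvRowGet row fn), (ft, pvRowGet row ft),
          ("min_year", pvRowGet row yr), ("max_year", pvRowGet row yr)] :: ph :: rest
  else acc

def condense_data_to_include_year_range_with_search_terms (table : List (List (String × String))) (term : String) : List (List (String × String)) :=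
  match table with
  | [] => []  -- Python: IndexError on table[0] (outside Pre_)
  | first_row :: _ =>
    match (PySem.Dict.ofList first_row).keys with  -- keys = list(table[0])
    | fn :: ft :: yr :: _ =>
      let first_dict : PySem.Dict String String :=
        PySem.Dict.ofList [(fn, pvRowGet first_row fn), (ft, pvRowGet first_row ft),
          ("min_year", pvRowGet first_row yr), ("max_year", pvRowGet first_row yr)]
      let stack := table.foldl (pvStepA fn ft yr term) [first_dict]
      let temp_list := stack.reverse
      -- temp_list[0] (never empty here) and del temp_list[0]
      (if (temp_list.headD PySem.Dict.empty).getD fn "" != term then temp_list.tail else temp_list).map PySem.Dict.items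
    | _ => []  -- Python: IndexError reading keys[0][2] (outside Pre_)

-- ===== PORT B =====
-- itertools.groupby(rows, key): list of (key value, run of consecutive rows with that key value)
def pvRunsBy (key : List (String × String) → String) : List (List (String × String)) → List (String × List (List (String × String)))
  | [] => []
  | r :: rs =>
    (key r, r :: rs.takeWhile (fun r' => key r' == key r)) ::
      pvRunsBy key (rs.dropWhile (fun r' => key r' == key r))
  termination_by l => l.length
  decreasing_by simpa using Nat.lt_succ_of_le (List.length_dropWhile_le _ _)

def condense_data_to_include_year_range_with_search_terms_alt (table : List (List (String × String))) (term : String) : List (List (String × String)) :=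
  match pvUnpackKeys (PySem.Dict.ofList (table.headD [])).keys with
  | some (fn, ft, yr) =>
    let matching := table.filter (fun r => pvRowGet r fn == term)
    (pvRunsBy (fun r => pvRowGet r ft) matching).map (fun g =>
      (PySem.Dict.ofList [(fn, term), (ft, g.1),
        ("min_year", pvRowGet (g.2.getLastD []) yr),    -- run[-1][year]; a run is never empty
        ("max_year", pvRowGet (g.2.headD []) yr)]).items)  -- run[0][year]
  | none => []  -- Python B: IndexError/ValueError (outside Pre_)

-- ===== PRECONDITION & SPEC =====
-- Pre_ excludes (a) inputs where Python A raises: empty table, fewer than 3 columns, a row missing the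
-- form-number key, or a matching row missing the title/year key (IndexError/KeyError); and (b) the
-- defensible corner where the first or second column is literally named 'min_year'/'max_year' AND the
-- term selects a row (or equals the seed's clobbered value): there the data column collides with the
-- synthetic output keys and A's grouping is an accident of that collision (A still returns; see the
-- cited example). Harmless collisions (no row matches) stay inside Pre_.
def Pre_condense_data_to_include_year_range_with_search_terms (table : List (List (String × String))) (term : String) : Prop :=
  let keys := (PySem.Dict.ofList (table.headD [])).keys
  let fn := keys.getD 0 ""
  let ft := keys.getD 1 ""
  let yr := keys.getD 2 ""
  table ≠ [] ∧ 3 ≤ keys.length ∧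
  (∀ row ∈ table, ((PySem.Dict.ofList row).get? fn).isSome ∧
    (pvRowGet row fn = term → ((PySem.Dict.ofList row).get? ft).isSome ∧ ((PySem.Dict.ofList row).get? yr).isSome)) ∧
  ((fn ≠ "min_year" ∧ fn ≠ "max_year" ∧ ft ≠ "min_year" ∧ ft ≠ "max_year") ∨
   ((∀ row ∈ table, pvRowGet row fn ≠ term) ∧
    ((fn = "min_year" ∨ fn = "max_year") → pvRowGet (table.headD []) yr ≠ term)))
instance (table : List (List (String × String))) (term : String) : Decidable (Pre_condense_data_to_include_year_range_with_search_terms table term) := by unfold Pre_condense_data_to_include_year_range_with_search_terms; infer_instance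

def pvWitness_condense_data_to_include_year_range_with_search_terms : (List (List (String × String))) × String :=
  ([[("form", "f1"), ("title", "T"), ("year", "2020")], [("form", "f1"), ("title", "T"), ("year", "2019")]], "f1")

def Spec_condense_data_to_include_year_range_with_search_terms (table : List (List (String × String))) (term : String) (out : List (List (String × String))) : Prop := out = condense_data_to_include_year_range_with_search_terms_alt table term
instance (table : List (List (String × String))) (term : String) (out : List (List (String × String))) : Decidable (Spec_condense_data_to_include_year_range_with_search_terms table term out) := by unfold Spec_condense_data_to_include_year_range_with_search_terms; infer_instance

-- ===== CLAIM (what is proved, stated in full; the proofs are below) =====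
def Claim_equal_condense_data_to_include_year_range_with_search_terms : Prop := ∀ (table : List (List (String × String))) (term : String), Dom_condense_data_to_include_year_range_with_search_terms table term → Pre_condense_data_to_include_year_range_with_search_terms table term → Spec_condense_data_to_include_year_range_with_search_terms table term (condense_data_to_include_year_range_with_search_terms table term)

-- ===== LEMMAS AND PROOFS =====

-- the 4-entry dict both programs build: dict([(fn,a),(ft,b),('min_year',c),('max_year',d)])
def pvDict4 (fn ft a b c d : String) : PySem.Dict String String :=
  PySem.Dict.ofList [(fn, a), (ft, b), ("min_year", c), ("max_year", d)]

theorem pvDict4_mk (fn ft a b c d : String) (h1 : fn ≠ ft) (h2 : fn ≠ "min_year") (h3 : fn ≠ "max_year")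
    (h4 : ft ≠ "min_year") (h5 : ft ≠ "max_year") :
    pvDict4 fn ft a b c d = PySem.Dict.mk [(fn, a), (ft, b), ("min_year", c), ("max_year", d)] := by
  simp [pvDict4, PySem.Dict.ofList, PySem.Dict.update, PySem.Dict.insert, PySem.Dict.contains,
    PySem.Dict.empty, beq_iff_eq, h1, h2, h3, h4, h5]

theorem pvDict4_getD_fn (fn ft a b c d : String) (h1 : fn ≠ ft) (h2 : fn ≠ "min_year") (h3 : fn ≠ "max_year")
    (h4 : ft ≠ "min_year") (h5 : ft ≠ "max_year") :
    (pvDict4 fn ft a b c d).getD fn "" = a := by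
  rw [pvDict4_mk fn ft a b c d h1 h2 h3 h4 h5]
  simp [PySem.Dict.getD, PySem.Dict.get?, List.find?]

theorem pvDict4_getD_ft (fn ft a b c d : String) (h1 : fn ≠ ft) (h2 : fn ≠ "min_year") (h3 : fn ≠ "max_year")
    (h4 : ft ≠ "min_year") (h5 : ft ≠ "max_year") :
    (pvDict4 fn ft a b c d).getD ft "" = b := by
  have hba : (fn == ft) = false := by simp [h1]
  rw [pvDict4_mk fn ft a b c d h1 h2 h3 h4 h5]
  simp [PySem.Dict.getD, PySem.Dict.get?, List.find?, hba]

theorem pvDict4_insert_min (fn ft a b c d y : String) (h1 : fn ≠ ft) (h2 : fn ≠ "min_year") (h3 : fn ≠ "max_year")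
    (h4 : ft ≠ "min_year") (h5 : ft ≠ "max_year") :
    (pvDict4 fn ft a b c d).insert "min_year" y = pvDict4 fn ft a b y d := by
  rw [pvDict4_mk fn ft a b c d h1 h2 h3 h4 h5, pvDict4_mk fn ft a b y d h1 h2 h3 h4 h5]
  simp [PySem.Dict.insert, PySem.Dict.contains, beq_iff_eq, Ne.symm h2, Ne.symm h4]
  exact ⟨h2, h4⟩

-- the groups A's stack accumulates while scanning the matching rows, chronological order;
-- (t, m, M) is the open group's title, current min_year and max_year
def pvGroupsFrom (fn ft yr term t m M : String) : List (List (String × String)) → List (PySem.Dict String String)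
  | [] => [pvDict4 fn ft term t m M]
  | r :: rs =>
    if pvRowGet r ft == t then pvGroupsFrom fn ft yr term t (pvRowGet r yr) M rs
    else pvDict4 fn ft term t m M :: pvGroupsFrom fn ft yr term (pvRowGet r ft) (pvRowGet r yr) (pvRowGet r yr) rs

-- the dict B emits for one groupby run
def pvMk (fn ft yr term : String) (g : String × List (List (String × String))) : PySem.Dict String String :=
  pvDict4 fn ft term g.1 (pvRowGet (g.2.getLastD []) yr) (pvRowGet (g.2.headD []) yr)

theorem pvLastFold {α β : Type} (f : α → β) (l : List α) :
    ∀ x : α, l.foldl (fun _ r => f r) (f x) = f (l.getLastD x) := by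
  induction l with
  | nil => intro x; rfl
  | cons y l ih => intro x; simp only [List.foldl_cons, List.getLastD_cons]; exact ih y

-- A's loop ignores the rows whose form number is not the term
theorem pvFoldFilter (fn ft yr term : String) (ms : List (List (String × String))) :
    ∀ acc, ms.foldl (pvStepA fn ft yr term) acc
      = (ms.filter (fun r => pvRowGet r fn == term)).foldl (pvStepA fn ft yr term) acc := by
  induction ms with
  | nil => intro acc; rfl
  | cons r rs ih =>
    intro acc
    by_cases h : (pvRowGet r fn == term) = true
    · simp only [List.filter_cons, h, if_true, List.foldl_cons]; exact ih _
    · have hb : (pvRowGet r fn == term) = false := by simpa using h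
      simp only [List.filter_cons, hb, Bool.false_eq_true, if_false, List.foldl_cons]
      have : pvStepA fn ft yr term acc r = acc := by
        simp [pvStepA, h]
      rw [this]; exact ih acc

-- invariant of A's loop over the matching rows, with an open group on top of the stack
theorem pvFoldRun (fn ft yr term : String) (h1 : fn ≠ ft) (h2 : fn ≠ "min_year") (h3 : fn ≠ "max_year")
    (h4 : ft ≠ "min_year") (h5 : ft ≠ "max_year") (ms : List (List (String × String)))
    (hm : ∀ r ∈ ms, pvRowGet r fn = term) :
    ∀ (t m M : String) (bs : List (PySem.Dict String String)),
      ms.foldl (pvStepA fn ft yr term) (pvDict4 fn ft term t m M :: bs)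
        = (pvGroupsFrom fn ft yr term t m M ms).reverse ++ bs := by
  induction ms with
  | nil => intro t m M bs; simp [pvGroupsFrom]
  | cons r rs ih =>
    intro t m M bs
    have hr : pvRowGet r fn = term := hm r (List.mem_cons_self)
    have hm' : ∀ x ∈ rs, pvRowGet x fn = term := fun x hx => hm x (List.mem_cons_of_mem r hx)
    simp only [List.foldl_cons]
    have hstep : pvStepA fn ft yr term (pvDict4 fn ft term t m M :: bs) r
        = if pvRowGet r ft == t
          then pvDict4 fn ft term t (pvRowGet r yr) M :: bs
          else pvDict4 fn ft term (pvRowGet r ft) (pvRowGet r yr) (pvRowGet r yr) :: pvDict4 fn ft term t m M :: bs := by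
      simp only [pvStepA, hr, pvDict4_getD_fn fn ft term t m M h1 h2 h3 h4 h5,
        pvDict4_getD_ft fn ft term t m M h1 h2 h3 h4 h5, beq_self_eq_true, if_pos, Bool.true_and]
      by_cases h : (pvRowGet r ft == t) = true
      · simp [h, pvDict4_insert_min fn ft term t m M (pvRowGet r yr) h1 h2 h3 h4 h5]
      · simp only [h]
        simp [pvDict4]
    rw [hstep]
    by_cases h : (pvRowGet r ft == t) = true
    · rw [if_pos h, ih hm' t (pvRowGet r yr) M bs]
      have : pvGroupsFrom fn ft yr term t m M (r :: rs)
          = pvGroupsFrom fn ft yr term t (pvRowGet r yr) M rs := by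
        simp [pvGroupsFrom, h]
      rw [this]
    · rw [if_neg h, ih hm' (pvRowGet r ft) (pvRowGet r yr) (pvRowGet r yr) (pvDict4 fn ft term t m M :: bs)]
      have : pvGroupsFrom fn ft yr term t m M (r :: rs)
          = pvDict4 fn ft term t m M
            :: pvGroupsFrom fn ft yr term (pvRowGet r ft) (pvRowGet r yr) (pvRowGet r yr) rs := by
        simp [pvGroupsFrom, h]
      rw [this, List.reverse_cons, List.append_assoc, List.singleton_append]

-- A's group list is B's: head = the open group closed by the rest of its run, tail = the later runs
theorem pvGroupsRuns (fn ft yr term : String) (ms : List (List (String × String))) :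
    ∀ t m M : String,
      pvGroupsFrom fn ft yr term t m M ms
        = pvDict4 fn ft term t
            ((ms.takeWhile (fun r => pvRowGet r ft == t)).foldl (fun _ r => pvRowGet r yr) m) M
          :: (pvRunsBy (fun r => pvRowGet r ft) (ms.dropWhile (fun r => pvRowGet r ft == t))).map
              (pvMk fn ft yr term) := by
  induction ms with
  | nil => intro t m M; simp [pvGroupsFrom, pvRunsBy]
  | cons r rs ih =>
    intro t m M
    by_cases h : (pvRowGet r ft == t) = true
    · rw [show pvGroupsFrom fn ft yr term t m M (r :: rs)
          = pvGroupsFrom fn ft yr term t (pvRowGet r yr) M rs by simp [pvGroupsFrom, h],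
        ih t (pvRowGet r yr) M]
      simp only [List.takeWhile_cons, List.dropWhile_cons, h, if_true, List.foldl_cons]
    · rw [show pvGroupsFrom fn ft yr term t m M (r :: rs)
          = pvDict4 fn ft term t m M
            :: pvGroupsFrom fn ft yr term (pvRowGet r ft) (pvRowGet r yr) (pvRowGet r yr) rs by
            simp [pvGroupsFrom, h],
        ih (pvRowGet r ft) (pvRowGet r yr) (pvRowGet r yr)]
      have hb : (pvRowGet r ft == t) = false := by simpa using h
      simp only [List.takeWhile_cons, List.dropWhile_cons, hb, Bool.false_eq_true, if_false]
      rw [pvRunsBy]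
      simp only [List.map_cons, List.foldl_nil, List.cons.injEq, true_and]
      constructor
      · simp only [pvMk, List.headD_cons, List.getLastD_cons]
        rw [pvLastFold (fun x => pvRowGet x yr) (rs.takeWhile fun r' => pvRowGet r' ft == pvRowGet r ft) r]
      · trivial

-- what A's final check reads off the seed dict when a column name collides with 'min_year'/'max_year'
theorem pvSeedGetD (fn ft a b c : String) (h1 : fn ≠ ft) :
    (pvDict4 fn ft a b c c).getD fn ""
      = if fn = "min_year" ∨ fn = "max_year" then c else a := by
  by_cases hf1 : fn = "min_year"
  · subst hf1
    by_cases hft : ft = "max_year"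
    · subst hft
      simp [pvDict4, PySem.Dict.ofList, PySem.Dict.update, PySem.Dict.insert, PySem.Dict.contains,
        PySem.Dict.empty, PySem.Dict.getD, PySem.Dict.get?, beq_iff_eq, h1, Ne.symm h1]
    · simp [pvDict4, PySem.Dict.ofList, PySem.Dict.update, PySem.Dict.insert, PySem.Dict.contains,
        PySem.Dict.empty, PySem.Dict.getD, PySem.Dict.get?, beq_iff_eq, h1, Ne.symm h1, hft]
  · by_cases hf2 : fn = "max_year"
    · subst hf2
      by_cases hft : ft = "min_year"
      · subst hft
        simp [pvDict4, PySem.Dict.ofList, PySem.Dict.update, PySem.Dict.insert, PySem.Dict.contains,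
          PySem.Dict.empty, PySem.Dict.getD, PySem.Dict.get?, beq_iff_eq, h1, Ne.symm h1]
      · simp [pvDict4, PySem.Dict.ofList, PySem.Dict.update, PySem.Dict.insert, PySem.Dict.contains,
          PySem.Dict.empty, PySem.Dict.getD, PySem.Dict.get?, beq_iff_eq, h1, Ne.symm h1, hft]
    · by_cases hft1 : ft = "min_year" <;> by_cases hft2 : ft = "max_year" <;>
        simp_all [pvDict4, PySem.Dict.ofList, PySem.Dict.update, PySem.Dict.insert, PySem.Dict.contains,
          PySem.Dict.empty, PySem.Dict.getD, PySem.Dict.get?, beq_iff_eq]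

-- the main equivalence
theorem pvMain (table : List (List (String × String))) (term : String)
    (hpre : Pre_condense_data_to_include_year_range_with_search_terms table term) :
    condense_data_to_include_year_range_with_search_terms table term
      = condense_data_to_include_year_range_with_search_terms_alt table term := by
  obtain ⟨hne, hlen, hpre'⟩ := hpre
  match htab : table with
  | [] => exact absurd rfl hne
  | r0 :: rest =>
  match hk : (PySem.Dict.ofList r0).keys with
  | [] => rw [List.headD_cons, hk] at hlen; simp at hlen
  | [_] => rw [List.headD_cons, hk] at hlen; simp at hlen
  | [_, _] => rw [List.headD_cons, hk] at hlen; simp at hlen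
  | fn :: ft :: yr :: krest =>
  rw [List.headD_cons, hk] at hpre'
  simp only [List.getD_cons_zero, List.getD_cons_succ] at hpre'
  obtain ⟨_hsome, hdisj⟩ := hpre'
  have hnd : (PySem.Dict.ofList r0).keys.Nodup := PySem.Dict.nodup_keys_ofList r0
  rw [hk] at hnd
  have h1 : fn ≠ ft := by
    rcases List.nodup_cons.mp hnd with ⟨hmem, _⟩
    exact fun h => hmem (h ▸ List.mem_cons_self)
  clear hnd hlen hne
  -- reduce both ports through the table/keys matches, name the seed dict
  simp only [condense_data_to_include_year_range_with_search_terms,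
    condense_data_to_include_year_range_with_search_terms_alt, pvUnpackKeys,
    List.headD_cons, hk]
  rw [show PySem.Dict.ofList [(fn, pvRowGet r0 fn), (ft, pvRowGet r0 ft),
        ("min_year", pvRowGet r0 yr), ("max_year", pvRowGet r0 yr)]
      = pvDict4 fn ft (pvRowGet r0 fn) (pvRowGet r0 ft) (pvRowGet r0 yr) (pvRowGet r0 yr) from rfl]
  rw [pvFoldFilter fn ft yr term (r0 :: rest)]
  rcases hdisj with ⟨h2, h3, h4, h5⟩ | ⟨hnm, hsy⟩
  case inr =>
    -- a colliding column name, but no row matches the term: both sides return []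
    have hfil : List.filter (fun r => pvRowGet r fn == term) (r0 :: rest) = [] := by
      rw [List.filter_eq_nil_iff]
      intro r hr
      simpa using hnm r hr
    rw [hfil]
    simp only [List.foldl_nil, List.reverse_cons, List.reverse_nil, List.nil_append,
      List.headD_cons, List.tail_cons]
    rw [pvSeedGetD fn ft (pvRowGet r0 fn) (pvRowGet r0 ft) (pvRowGet r0 yr) h1]
    rw [if_pos (by
      split_ifs with hc
      · simpa [bne_iff_ne] using hsy hc
      · simpa [bne_iff_ne] using hnm r0 List.mem_cons_self)]
    simp [pvRunsBy]
  case inl =>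
  by_cases hp0 : (pvRowGet r0 fn == term) = true
  case pos =>
    -- first row matches: the seed dict is the open group of the first run
    have hr0 : pvRowGet r0 fn = term := by simpa using hp0
    simp only [List.filter_cons, hp0, if_true, List.foldl_cons]
    have hstep : pvStepA fn ft yr term
        [pvDict4 fn ft (pvRowGet r0 fn) (pvRowGet r0 ft) (pvRowGet r0 yr) (pvRowGet r0 yr)] r0
        = [pvDict4 fn ft term (pvRowGet r0 ft) (pvRowGet r0 yr) (pvRowGet r0 yr)] := by
      simp only [pvStepA, hr0, beq_self_eq_true, if_true,
        pvDict4_getD_fn fn ft term (pvRowGet r0 ft) (pvRowGet r0 yr) (pvRowGet r0 yr) h1 h2 h3 h4 h5,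
        pvDict4_getD_ft fn ft term (pvRowGet r0 ft) (pvRowGet r0 yr) (pvRowGet r0 yr) h1 h2 h3 h4 h5,
        Bool.and_self,
        pvDict4_insert_min fn ft term (pvRowGet r0 ft) (pvRowGet r0 yr) (pvRowGet r0 yr) (pvRowGet r0 yr) h1 h2 h3 h4 h5]
    rw [hstep,
      pvFoldRun fn ft yr term h1 h2 h3 h4 h5 _
        (fun r hr => by simpa using (List.mem_filter.mp hr).2)
        (pvRowGet r0 ft) (pvRowGet r0 yr) (pvRowGet r0 yr) [],
      List.append_nil, List.reverse_reverse,
      pvGroupsRuns fn ft yr term _ (pvRowGet r0 ft) (pvRowGet r0 yr) (pvRowGet r0 yr)]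
    simp only [List.headD_cons, List.tail_cons,
      pvDict4_getD_fn fn ft term (pvRowGet r0 ft) _ (pvRowGet r0 yr) h1 h2 h3 h4 h5,
      bne_self_eq_false, Bool.false_eq_true, if_false]
    rw [pvRunsBy]
    simp only [List.map_cons]
    congr 1
    · congr 1
      simp only [List.headD_cons, List.getLastD_cons]
      congr 1
      exact pvLastFold (fun x => pvRowGet x yr)
        ((rest.filter (fun r => pvRowGet r fn == term)).takeWhile
          (fun r' => pvRowGet r' ft == pvRowGet r0 ft)) r0
    · simp only [List.map_map]
      rfl
  case neg =>
    -- first row does not match: the seed dict is deleted at the end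
    have hr0 : (pvRowGet r0 fn == term) = false := by simpa using hp0
    simp only [List.filter_cons, hr0, Bool.false_eq_true, if_false]
    match hfil : rest.filter (fun r => pvRowGet r fn == term) with
    | [] =>
      simp only [List.foldl_nil, List.reverse_cons, List.reverse_nil, List.nil_append,
        List.headD_cons, List.tail_cons,
        pvDict4_getD_fn fn ft (pvRowGet r0 fn) (pvRowGet r0 ft) (pvRowGet r0 yr) (pvRowGet r0 yr) h1 h2 h3 h4 h5]
      rw [if_pos (by simp [bne, hr0])]
      simp [pvRunsBy]
    | m :: ms =>
      have hmem : ∀ r ∈ m :: ms, pvRowGet r fn = term := by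
        intro r hr
        have := List.mem_filter.mp (hfil ▸ hr : r ∈ rest.filter (fun r => pvRowGet r fn == term))
        simpa using this.2
      have hm : pvRowGet m fn = term := hmem m List.mem_cons_self
      simp only [List.foldl_cons]
      have hstep : pvStepA fn ft yr term
          [pvDict4 fn ft (pvRowGet r0 fn) (pvRowGet r0 ft) (pvRowGet r0 yr) (pvRowGet r0 yr)] m
          = pvDict4 fn ft term (pvRowGet m ft) (pvRowGet m yr) (pvRowGet m yr)
            :: [pvDict4 fn ft (pvRowGet r0 fn) (pvRowGet r0 ft) (pvRowGet r0 yr) (pvRowGet r0 yr)] := by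
        have hcond : (pvRowGet m fn == (pvDict4 fn ft (pvRowGet r0 fn) (pvRowGet r0 ft) (pvRowGet r0 yr) (pvRowGet r0 yr)).getD fn "") = false := by
          have hne : pvRowGet r0 fn ≠ term := by simpa using hr0
          rw [pvDict4_getD_fn fn ft _ _ _ _ h1 h2 h3 h4 h5, hm]
          simp only [beq_eq_false_iff_ne]
          exact fun h => hne h.symm
        have hcond' : ((term == (pvDict4 fn ft (pvRowGet r0 fn) (pvRowGet r0 ft) (pvRowGet r0 yr) (pvRowGet r0 yr)).getD fn "")
            && (pvRowGet m ft == (pvDict4 fn ft (pvRowGet r0 fn) (pvRowGet r0 ft) (pvRowGet r0 yr) (pvRowGet r0 yr)).getD ft "")) = false := by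
          rw [← hm]
          simp [hcond]
        simp only [pvStepA, hm, beq_self_eq_true, if_true, hcond', Bool.false_eq_true, if_false]
        simp [pvDict4]
      rw [hstep,
        pvFoldRun fn ft yr term h1 h2 h3 h4 h5 ms
          (fun r hr => hmem r (List.mem_cons_of_mem m hr))
          (pvRowGet m ft) (pvRowGet m yr) (pvRowGet m yr)
          [pvDict4 fn ft (pvRowGet r0 fn) (pvRowGet r0 ft) (pvRowGet r0 yr) (pvRowGet r0 yr)],
        List.reverse_append, List.reverse_reverse, List.reverse_cons, List.reverse_nil,
        List.nil_append, List.singleton_append]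
      simp only [List.headD_cons, List.tail_cons,
        pvDict4_getD_fn fn ft (pvRowGet r0 fn) (pvRowGet r0 ft) (pvRowGet r0 yr) (pvRowGet r0 yr) h1 h2 h3 h4 h5]
      rw [if_pos (by simp [bne, hr0])]
      rw [pvGroupsRuns fn ft yr term ms (pvRowGet m ft) (pvRowGet m yr) (pvRowGet m yr),
        pvRunsBy]
      simp only [List.map_cons]
      congr 1
      · congr 1
        simp only [List.headD_cons, List.getLastD_cons]
        congr 1
        exact pvLastFold (fun x => pvRowGet x yr)
          (ms.takeWhile (fun r' => pvRowGet r' ft == pvRowGet m ft)) m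
      · simp only [List.map_map]
        rfl

-- ===== VERDICT (by name: the statement is the Claim_ definition above) =====
theorem condense_data_to_include_year_range_with_search_terms_spec : Claim_equal_condense_data_to_include_year_range_with_search_terms := by
  intro table term _hdom hpre
  exact pvMain table term hpre
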